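-- pv_equiv track=rewrite | github.com/wilsonintai76/thomian-library-system | backend/views.py | _code39_svg
-- ===== SOURCE A (Python) =====
-- _CODE39 = {
--     '0':'nnnwwnwnn','1':'wnnwnnnnw','2':'nnwwnnnnw','3':'wnwwnnnnn','4':'nnnwwnnnw',
--     '5':'wnnwwnnnn','6':'nnwwwnnnn','7':'nnnwnnwnw','8':'wnnwnnwnn','9':'nnwwnnwnn',
--     'A':'wnnnnwnnw','B':'nnwnnwnnw','C':'wnwnnwnnn','D':'nnnnwwnnw','E':'wnnnwwnnn',
--     'F':'nnwnwwnnn','G':'nnnnnwwnw','H':'wnnnnwwnn','I':'nnwnnwwnn','J':'nnnnwwwnn',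
--     'K':'wnnnnnnww','L':'nnwnnnnww','M':'wnwnnnnwn','N':'nnnnwnnww','O':'wnnnwnnwn',
--     'P':'nnwnwnnwn','Q':'nnnnnwnww','R':'wnnnnwnwn','S':'nnwnnwnwn','T':'nnnnwwnwn',
--     'U':'wwnnnnnnw','V':'nwwnnnnnw','W':'wwwnnnnnn','X':'nwnnwnnnw','Y':'wwnnwnnnn',
--     'Z':'nwwnwnnnn','-':'nwnnnnwnw',' ':'nwnnwwnnn','*':'nwnnwnwnn','.':'wwnnnnwnn',
--     '$':'nwnwnwnnn','/':'nwnwnnnwn','+':'nwnnnwnwn','%':'nnnwnwnwn',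
-- }
--
-- def _code39_svg(value: str, bar_height: int = 26) -> str:
--     """Return an SVG Code39 barcode identical to the frontend Code39Barcode component."""
--     WIDE, NARROW, GAP = 3, 1, 1
--     text = '*' + ''.join(c for c in value.upper() if c in _CODE39) + '*'
--     bars: list[tuple[int, int]] = []
--     x = 0
--     for ch in text:
--         pat = _CODE39.get(ch, _CODE39['*'])
--         for i in range(9):
--             w = WIDE if pat[i] == 'w' else NARROW
--             if i % 2 == 0:
--                 bars.append((x, w))
--             x += w + (GAP if i % 2 == 1 else 0)
--         x += GAP
--     total_w = x
--     rects = ''.join(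
--         f'<rect x="{bx}" y="0" width="{bw}" height="{bar_height}" fill="#000"/>'
--         for bx, bw in bars
--     )
--     return (
--         f'<svg viewBox="0 0 {total_w} {bar_height}" preserveAspectRatio="none" '
--         f'style="width:100%;height:{bar_height}px;display:block">{rects}</svg>'
--     )
-- ===== SOURCE B (Python) =====
-- # B: prefix-sum decomposition — build a flat list of (consumed-width, bar-width-or-None)
-- # elements for the whole text, compute start positions by one running-sum pass, then emit
-- # rects for the bar elements only.  Same output as A; objective: alternative decomposition.
-- _CODE39 = {
--     '0':'nnnwwnwnn','1':'wnnwnnnnw','2':'nnwwnnnnw','3':'wnwwnnnnn','4':'nnnwwnnnw',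
--     '5':'wnnwwnnnn','6':'nnwwwnnnn','7':'nnnwnnwnw','8':'wnnwnnwnn','9':'nnwwnnwnn',
--     'A':'wnnnnwnnw','B':'nnwnnwnnw','C':'wnwnnwnnn','D':'nnnnwwnnw','E':'wnnnwwnnn',
--     'F':'nnwnwwnnn','G':'nnnnnwwnw','H':'wnnnnwwnn','I':'nnwnnwwnn','J':'nnnnwwwnn',
--     'K':'wnnnnnnww','L':'nnwnnnnww','M':'wnwnnnnwn','N':'nnnnwnnww','O':'wnnnwnnwn',
--     'P':'nnwnwnnwn','Q':'nnnnnwnww','R':'wnnnnwnwn','S':'nnwnnwnwn','T':'nnnnwwnwn',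
--     'U':'wwnnnnnnw','V':'nwwnnnnnw','W':'wwwnnnnnn','X':'nwnnwnnnw','Y':'wwnnwnnnn',
--     'Z':'nwwnwnnnn','-':'nwnnnnwnw',' ':'nwnnwwnnn','*':'nwnnwnwnn','.':'wwnnnnwnn',
--     '$':'nwnwnwnnn','/':'nwnwnnnwn','+':'nwnnnwnwn','%':'nnnwnwnwn',
-- }
--
-- def _code39_svg(value: str, bar_height: int = 26) -> str:
--     """Return an SVG Code39 barcode identical to the frontend Code39Barcode component."""
--     text = '*' + ''.join(c for c in value.upper() if c in _CODE39) + '*'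
--     # flat element list: even pattern positions are bars (consume w), odd ones are
--     # spaces (consume w + the inter-element gap); one extra gap element per character
--     elems = []
--     for ch in text:
--         pat = _CODE39[ch]
--         for i in range(9):
--             w = 3 if pat[i] == 'w' else 1
--             elems.append((w, w) if i % 2 == 0 else (w + 1, None))
--         elems.append((1, None))
--     # one prefix-sum pass gives every element's start position and the total width
--     starts = []
--     x = 0
--     for cw, _ in elems:
--         starts.append(x)
--         x += cw
--     total_w = x
--     rects = ''.join(
--         f'<rect x="{sx}" y="0" width="{bw}" height="{bar_height}" fill="#000"/>'
--         for sx, (_, bw) in zip(starts, elems) if bw is not None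
--     )
--     return (
--         f'<svg viewBox="0 0 {total_w} {bar_height}" preserveAspectRatio="none" '
--         f'style="width:100%;height:{bar_height}px;display:block">{rects}</svg>'
--     )
-- ===== Notes on version B (the rewrite author's own statement) =====
-- stated objective: alternative
-- what changed: A emits bars and accumulates the x cursor in one stateful loop with gap bookkeeping inline; B first builds a flat list of (consumed-width, bar-flag) elements with the gaps folded into the widths, then computes all start positions in a single prefix-sum pass and emits rects by filtering the bar-flagged elements.
import Mathlib
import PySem

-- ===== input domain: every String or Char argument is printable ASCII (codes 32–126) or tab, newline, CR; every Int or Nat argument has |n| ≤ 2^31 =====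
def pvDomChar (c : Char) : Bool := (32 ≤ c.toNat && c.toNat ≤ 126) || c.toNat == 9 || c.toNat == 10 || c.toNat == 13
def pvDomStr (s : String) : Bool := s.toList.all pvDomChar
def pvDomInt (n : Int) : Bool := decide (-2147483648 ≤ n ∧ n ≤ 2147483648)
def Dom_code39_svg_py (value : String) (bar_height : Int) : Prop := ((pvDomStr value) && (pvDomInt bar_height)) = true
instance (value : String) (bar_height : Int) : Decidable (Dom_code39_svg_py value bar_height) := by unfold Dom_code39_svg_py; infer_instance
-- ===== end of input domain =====

-- B replaces A's single stateful bar-emitting loop by a flat element list (width + bar flag),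
-- one prefix-sum pass for the start positions, and a filtered pass emitting the rects.

-- the module-level _CODE39 dict (a shared constant of the module, used by both programs)
def code39Dict : PySem.Dict Char String := PySem.Dict.mk [
  ('0',"nnnwwnwnn"),('1',"wnnwnnnnw"),('2',"nnwwnnnnw"),('3',"wnwwnnnnn"),('4',"nnnwwnnnw"),
  ('5',"wnnwwnnnn"),('6',"nnwwwnnnn"),('7',"nnnwnnwnw"),('8',"wnnwnnwnn"),('9',"nnwwnnwnn"),
  ('A',"wnnnnwnnw"),('B',"nnwnnwnnw"),('C',"wnwnnwnnn"),('D',"nnnnwwnnw"),('E',"wnnnwwnnn"),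
  ('F',"nnwnwwnnn"),('G',"nnnnnwwnw"),('H',"wnnnnwwnn"),('I',"nnwnnwwnn"),('J',"nnnnwwwnn"),
  ('K',"wnnnnnnww"),('L',"nnwnnnnww"),('M',"wnwnnnnwn"),('N',"nnnnwnnww"),('O',"wnnnwnnwn"),
  ('P',"nnwnwnnwn"),('Q',"nnnnnwnww"),('R',"wnnnnwnwn"),('S',"nnwnnwnwn"),('T',"nnnnwwnwn"),
  ('U',"wwnnnnnnw"),('V',"nwwnnnnnw"),('W',"wwwnnnnnn"),('X',"nwnnwnnnw"),('Y',"wwnnwnnnn"),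
  ('Z',"nwwnwnnnn"),('-',"nwnnnnwnw"),(' ',"nwnnwwnnn"),('*',"nwnnwnwnn"),('.',"wwnnnnwnn"),
  ('$',"nwnwnwnnn"),('/',"nwnwnnnwn"),('+',"nwnnnwnwn"),('%',"nnnwnwnwn")]

-- text = '*' + ''.join(c for c in value.upper() if c in _CODE39) + '*'   (same line in A and B; a Python str as List Char)
def textOf (value : String) : List Char :=
  '*' :: ((PySem.Str.upper value).toList.filter (fun c => code39Dict.contains c)) ++ ['*']

-- one <rect …/> piece (the same f-string in A and B)
def rectStr (bar_height x w : Int) : String :=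
  "<rect x=\"" ++ PySem.Int.toStr x ++ "\" y=\"0\" width=\"" ++ PySem.Int.toStr w ++
  "\" height=\"" ++ PySem.Int.toStr bar_height ++ "\" fill=\"#000\"/>"

-- the surrounding <svg …>…</svg> f-string (the same in A and B)
def svgStr (bar_height total_w : Int) (rects : String) : String :=
  "<svg viewBox=\"0 0 " ++ PySem.Int.toStr total_w ++ " " ++ PySem.Int.toStr bar_height ++
  "\" preserveAspectRatio=\"none\" style=\"width:100%;height:" ++ PySem.Int.toStr bar_height ++
  "px;display:block\">" ++ rects ++ "</svg>"

-- ===== PORT A =====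
-- body of A's inner 'for i in range(9)' loop; state = (bars, x)
def aInner (pat : String) (st : List (Int × Int) × Int) (i : Int) : List (Int × Int) × Int :=
  let w : Int := if PySem.Str.pyGet? pat i = some 'w' then 3 else 1
  let bars := if PySem.Int.mod i 2 = 0 then st.1 ++ [(st.2, w)] else st.1
  (bars, st.2 + (w + (if PySem.Int.mod i 2 = 1 then 1 else 0)))

-- body of A's outer 'for ch in text' loop
def aStep (st : List (Int × Int) × Int) (ch : Char) : List (Int × Int) × Int :=
  let pat := code39Dict.getD ch (code39Dict.getD '*' "")   -- _CODE39.get(ch, _CODE39['*']); '*' is always a key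
  let st2 := (PySem.List.pyRange 0 9 1).foldl (aInner pat) st
  (st2.1, st2.2 + 1)                                        -- x += GAP

def code39_svg_py (value : String) (bar_height : Int) : String :=
  let st := (textOf value).foldl aStep ([], 0)
  let total_w := st.2
  let rects := PySem.Str.join "" (st.1.map (fun bw => rectStr bar_height bw.1 bw.2))
  svgStr bar_height total_w rects

-- ===== PORT B =====
-- body of B's inner loop: append one element (consumed width, bar width or none)
def bInner (pat : String) (es : List (Int × Option Int)) (i : Int) : List (Int × Option Int) :=
  let w : Int := if PySem.Str.pyGet? pat i = some 'w' then 3 else 1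
  es ++ [if PySem.Int.mod i 2 = 0 then (w, some w) else (w + 1, none)]

-- body of B's outer loop: the nine pattern elements plus the trailing gap element
def bStep (es : List (Int × Option Int)) (ch : Char) : List (Int × Option Int) :=
  let pat := code39Dict.getD ch ""   -- _CODE39[ch]; every ch of text is a key, KeyError impossible
  let es2 := (PySem.List.pyRange 0 9 1).foldl (bInner pat) es
  es2 ++ [((1 : Int), (none : Option Int))]

-- body of B's prefix-sum loop; state = (starts, x)
def spStep (sp : List Int × Int) (e : Int × Option Int) : List Int × Int :=
  (sp.1 ++ [sp.2], sp.2 + e.1)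

def code39_svg_py_alt (value : String) (bar_height : Int) : String :=
  let elems := (textOf value).foldl bStep []
  let sp := elems.foldl spStep ([], 0)
  let total_w := sp.2
  let rects := PySem.Str.join "" ((sp.1.zip elems).filterMap (fun se =>
    se.2.2.map (fun bw => rectStr bar_height se.1 bw)))
  svgStr bar_height total_w rects

-- ===== PRECONDITION & SPEC =====
def Spec_code39_svg_py (value : String) (bar_height : Int) (out : String) : Prop := out = code39_svg_py_alt value bar_height
instance (value : String) (bar_height : Int) (out : String) : Decidable (Spec_code39_svg_py value bar_height out) := by unfold Spec_code39_svg_py; infer_instance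

-- ===== CLAIM (what is proved, stated in full; the proofs are below) =====
def Claim_equal_code39_svg_py : Prop := ∀ (value : String) (bar_height : Int), Dom_code39_svg_py value bar_height → Spec_code39_svg_py value bar_height (code39_svg_py value bar_height)

-- ===== LEMMAS AND PROOFS =====

-- B's element list for one character with pattern `pat`
def charE (pat : String) : List (Int × Option Int) :=
  (PySem.List.pyRange 0 9 1).flatMap (fun i =>
    let w : Int := if PySem.Str.pyGet? pat i = some 'w' then 3 else 1
    [if PySem.Int.mod i 2 = 0 then (w, some w) else (w + 1, none)]) ++ [(1, none)]

-- total consumed width of an element list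
def sumw : List (Int × Option Int) → Int
  | [] => 0
  | e :: r => e.1 + sumw r

-- start positions of the elements (prefix sums from x)
def startsE (x : Int) : List (Int × Option Int) → List Int
  | [] => []
  | e :: r => x :: startsE (x + e.1) r

-- the (x, width) bar list an element list denotes
def direct (x : Int) : List (Int × Option Int) → List (Int × Int)
  | [] => []
  | e :: r => match e.2 with
    | some bw => (x, bw) :: direct (x + e.1) r
    | none => direct (x + e.1) r

theorem sumw_append (a b : List (Int × Option Int)) : sumw (a ++ b) = sumw a + sumw b := by
  induction a with
  | nil => simp [sumw]
  | cons e r ih => simp [sumw, ih]; ring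

theorem direct_append (a b : List (Int × Option Int)) (x : Int) :
    direct x (a ++ b) = direct x a ++ direct (x + sumw a) b := by
  induction a generalizing x with
  | nil => simp [direct, sumw]
  | cons e r ih =>
    cases h : e.2 <;> simp [direct, h, ih, sumw] <;> rw [show x + (e.1 + sumw r) = x + e.1 + sumw r by ring]

-- B's prefix-sum fold computes startsE and the total width
theorem sp_spec (elems : List (Int × Option Int)) (l : List Int) (x : Int) :
    elems.foldl spStep (l, x) = (l ++ startsE x elems, x + sumw elems) := by
  induction elems generalizing l x with
  | nil => simp [startsE, sumw]
  | cons e r ih => simp [spStep, startsE, sumw, ih]; ring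

-- zipping starts with elements and keeping the bar-flagged ones is `direct`
theorem zip_filterMap_spec {α : Type} (elems : List (Int × Option Int)) (x : Int)
    (f : Int → Int → α) :
    ((startsE x elems).zip elems).filterMap (fun se => se.2.2.map (fun bw => f se.1 bw))
      = (direct x elems).map (fun p => f p.1 p.2) := by
  induction elems generalizing x with
  | nil => simp [startsE, direct]
  | cons e r ih => cases h : e.2 <;> simp [startsE, direct, h, ih]

theorem pyRange9 : PySem.List.pyRange 0 9 1 = [0,1,2,3,4,5,6,7,8] := by decide

-- one character of A's loop, from any state, appends `direct` of B's elements and advances by their width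
theorem aChar_spec (pat : String) (bars : List (Int × Int)) (x : Int) :
    ((PySem.List.pyRange 0 9 1).foldl (aInner pat) (bars, x)).1
        = bars ++ direct x (charE pat)
      ∧ ((PySem.List.pyRange 0 9 1).foldl (aInner pat) (bars, x)).2 + 1
        = x + sumw (charE pat) := by
  simp only [pyRange9, charE, List.foldl_cons, List.foldl_nil, List.flatMap_cons,
    List.flatMap_nil, aInner,
    show PySem.Int.mod (0:Int) 2 = 0 from by decide,
    show PySem.Int.mod (1:Int) 2 = 1 from by decide,
    show PySem.Int.mod (2:Int) 2 = 0 from by decide,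
    show PySem.Int.mod (3:Int) 2 = 1 from by decide,
    show PySem.Int.mod (4:Int) 2 = 0 from by decide,
    show PySem.Int.mod (5:Int) 2 = 1 from by decide,
    show PySem.Int.mod (6:Int) 2 = 0 from by decide,
    show PySem.Int.mod (7:Int) 2 = 1 from by decide,
    show PySem.Int.mod (8:Int) 2 = 0 from by decide]
  norm_num [direct, sumw]
  ring

-- the default argument of getD is irrelevant on a present key
theorem getD_irrel (ch : Char) (d1 d2 : String) (h : code39Dict.contains ch = true) :
    code39Dict.getD ch d1 = code39Dict.getD ch d2 := by
  cases hv : code39Dict.get? ch with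
  | none => rw [PySem.Dict.get?_eq_none_iff_contains] at hv; rw [h] at hv; cases hv
  | some v =>
    rw [PySem.Dict.getD_of_get?_eq_some code39Dict d1 hv,
        PySem.Dict.getD_of_get?_eq_some code39Dict d2 hv]

-- A's outer fold over any character list whose members are keys
theorem aFold_spec (chs : List Char) (h : ∀ ch ∈ chs, code39Dict.contains ch = true)
    (bars : List (Int × Int)) (x : Int) :
    chs.foldl aStep (bars, x)
      = (bars ++ direct x (chs.flatMap (fun ch => charE (code39Dict.getD ch ""))),
         x + sumw (chs.flatMap (fun ch => charE (code39Dict.getD ch "")))) := by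
  induction chs generalizing bars x with
  | nil => simp [direct, sumw]
  | cons ch r ih =>
    have hch : code39Dict.contains ch = true := h ch (by simp)
    have hr : ∀ c ∈ r, code39Dict.contains c = true := fun c hc => h c (by simp [hc])
    have hstep : aStep (bars, x) ch
        = (bars ++ direct x (charE (code39Dict.getD ch "")),
           x + sumw (charE (code39Dict.getD ch ""))) := by
      unfold aStep
      rw [getD_irrel ch (code39Dict.getD '*' "") "" hch]
      obtain ⟨h1, h2⟩ := aChar_spec (code39Dict.getD ch "") bars x
      exact Prod.ext h1 h2
    simp only [List.foldl_cons, hstep, ih hr, List.flatMap_cons, direct_append, sumw_append,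
      List.append_assoc, Prod.mk.injEq]
    exact ⟨trivial, by ring⟩

-- B's element-building fold is the flatMap of charE
theorem bElems_spec (chs : List Char) (es : List (Int × Option Int)) :
    chs.foldl bStep es = es ++ chs.flatMap (fun ch => charE (code39Dict.getD ch "")) := by
  induction chs generalizing es with
  | nil => simp
  | cons ch r ih =>
    have hstep : bStep es ch = es ++ charE (code39Dict.getD ch "") := by
      have hbi : bInner (code39Dict.getD ch "") = fun es i => es ++
          [if PySem.Int.mod i 2 = 0
            then ((if PySem.Str.pyGet? (code39Dict.getD ch "") i = some 'w' then (3:Int) else 1),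
                  some (if PySem.Str.pyGet? (code39Dict.getD ch "") i = some 'w' then (3:Int) else 1))
            else ((if PySem.Str.pyGet? (code39Dict.getD ch "") i = some 'w' then (3:Int) else 1) + 1,
                  none)] := by
        funext es i; simp [bInner]
      simp only [bStep, hbi, charE]
      rw [PySem.List.foldl_append_eq_flatMap, List.append_assoc]
    rw [List.foldl_cons, hstep, ih, List.flatMap_cons, List.append_assoc]

-- every character of the text is a key of the dict
theorem textOf_keys (value : String) : ∀ ch ∈ textOf value, code39Dict.contains ch = true := by
  intro ch hch
  unfold textOf at hch
  rcases List.mem_cons.mp hch with h | h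
  · subst h; decide
  · rcases List.mem_append.mp h with h | h
    · exact (List.mem_filter.mp h).2
    · rcases List.mem_cons.mp h with h | h
      · subst h; decide
      · cases h

-- ===== VERDICT (by name: the statement is the Claim_ definition above) =====
theorem code39_svg_py_spec : Claim_equal_code39_svg_py := by
  intro value bar_height _
  show code39_svg_py value bar_height = code39_svg_py_alt value bar_height
  simp only [code39_svg_py, code39_svg_py_alt,
    aFold_spec (textOf value) (textOf_keys value), bElems_spec,
    List.nil_append, sp_spec, zip_filterMap_spec (f := rectStr bar_height)]
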